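-- pv_equiv track=rewrite | github.com/tyxben/arcana | src/arcana/rag/verifier.py | _sentence_is_supported
-- ===== SOURCE A (Python) =====
-- def _sentence_is_supported(
--
--     sentence: str,
--     citation_snippets: list[str],
--     cited_sources: set[str],
-- ) -> bool:
--     """
--     Check if a sentence has support from citations.
--
--     A sentence is considered supported if any citation snippet shares
--     significant word overlap with it.
--     """
--     sentence_lower = sentence.lower()
--     sentence_words = set(sentence_lower.split())
--
--     # Check for word overlap with citation snippets
--     for snippet in citation_snippets:
--         snippet_words = set(snippet.split())
--         if not snippet_words:
--             continue
--         overlap = sentence_words & snippet_words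
--         # Consider supported if at least 2 content words overlap
--         # (excluding very short common words)
--         content_overlap = {w for w in overlap if len(w) > 3}
--         if len(content_overlap) >= 2:
--             return True
--
--     return False
-- ===== SOURCE B (Python) =====
-- def _sentence_is_supported(
--     sentence: str,
--     citation_snippets: list[str],
--     cited_sources: set[str],
-- ) -> bool:
--     """Inverted-index reformulation: index long snippet words -> snippet ids,
--     then accumulate per-snippet counts of distinct long sentence words."""
--     content = {w for w in sentence.lower().split() if len(w) > 3}
--     index = {}
--     for i, snippet in enumerate(citation_snippets):
--         for w in set(snippet.split()):
--             if len(w) > 3: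
--                 index[w] = index.get(w, []) + [i]
--     counts = {}
--     for w in content:
--         for i in index.get(w, []):
--             counts[i] = counts.get(i, 0) + 1
--     return any(c >= 2 for c in counts.values())
-- ===== Notes on version B (the rewrite author's own statement) =====
-- stated objective: alternative
-- what changed: Replaced the per-snippet set-intersection scan with an inverted index (long snippet word -> snippet ids) plus per-snippet counters accumulated over the sentence's distinct long words.
import Mathlib
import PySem

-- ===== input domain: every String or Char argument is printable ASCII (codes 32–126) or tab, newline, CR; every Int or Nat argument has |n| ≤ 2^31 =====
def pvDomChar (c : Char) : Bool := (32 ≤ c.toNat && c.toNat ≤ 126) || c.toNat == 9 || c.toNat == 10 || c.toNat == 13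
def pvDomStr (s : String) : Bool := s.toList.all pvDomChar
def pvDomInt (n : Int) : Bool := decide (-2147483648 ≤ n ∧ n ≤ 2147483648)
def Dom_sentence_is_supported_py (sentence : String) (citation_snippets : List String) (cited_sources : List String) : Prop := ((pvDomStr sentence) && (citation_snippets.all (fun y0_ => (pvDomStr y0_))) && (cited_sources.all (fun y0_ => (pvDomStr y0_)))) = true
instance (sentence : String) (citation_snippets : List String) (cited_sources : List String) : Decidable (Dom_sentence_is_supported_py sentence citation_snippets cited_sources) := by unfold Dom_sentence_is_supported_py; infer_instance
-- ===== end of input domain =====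

-- B replaces A's per-snippet set intersection by an inverted index of long snippet words
-- plus per-snippet counters over the sentence's distinct long words (alternative algorithm,
-- same return value; the unused `cited_sources` parameter is kept as in A).

-- ===== PORT A =====
-- the `for snippet in citation_snippets: … return True … / return False` loop of A
def pvGoA (sentence_words : PySem.Set String) : List String → Bool
  | [] => false
  | snippet :: rest =>
    let snippet_words : PySem.Set String := PySem.Set.ofList (PySem.Str.split₀ snippet)
    if snippet_words = [] then pvGoA sentence_words rest
    else
      let overlap : PySem.Set String := PySem.Set.inter sentence_words snippet_words
      let content_overlap : PySem.Set String :=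
        PySem.Set.ofList (overlap.filter (fun w => decide (3 < PySem.Str.len w)))
      if 2 ≤ PySem.Set.len content_overlap then true else pvGoA sentence_words rest

def sentence_is_supported_py (sentence : String) (citation_snippets : List String) (cited_sources : List String) : Bool :=
  let sentence_lower := PySem.Str.lower sentence
  let sentence_words : PySem.Set String := PySem.Set.ofList (PySem.Str.split₀ sentence_lower)
  pvGoA sentence_words citation_snippets

-- ===== PORT B =====
-- `for w in set(snippet.split()): if len(w) > 3: index[w] = index.get(w, []) + [i]`
def pvIndexStep (d : PySem.Dict String (List Int)) (p : Int × String) : PySem.Dict String (List Int) :=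
  (PySem.Set.ofList (PySem.Str.split₀ p.2)).foldl
    (fun d w => if 3 < PySem.Str.len w then d.modify w [] (fun l => l ++ [p.1]) else d) d

def sentence_is_supported_py_alt (sentence : String) (citation_snippets : List String) (cited_sources : List String) : Bool :=
  let content : PySem.Set String :=
    PySem.Set.ofList ((PySem.Str.split₀ (PySem.Str.lower sentence)).filter (fun w => decide (3 < PySem.Str.len w)))
  let index : PySem.Dict String (List Int) :=
    (PySem.List.enumerate citation_snippets).foldl pvIndexStep PySem.Dict.empty
  let counts : PySem.Dict Int Int :=
    content.foldl (fun c w => (index.getD w []).foldl (fun c i => c.modify i 0 (· + 1)) c) PySem.Dict.empty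
  counts.values.any (fun c => 2 ≤ c)

-- ===== PRECONDITION & SPEC =====
def Spec_sentence_is_supported_py (sentence : String) (citation_snippets : List String) (cited_sources : List String) (out : Bool) : Prop := out = sentence_is_supported_py_alt sentence citation_snippets cited_sources
instance (sentence : String) (citation_snippets : List String) (cited_sources : List String) (out : Bool) : Decidable (Spec_sentence_is_supported_py sentence citation_snippets cited_sources out) := by unfold Spec_sentence_is_supported_py; infer_instance

-- ===== CLAIM (what is proved, stated in full; the proofs are below) =====
def Claim_equal_sentence_is_supported_py : Prop := ∀ (sentence : String) (citation_snippets : List String) (cited_sources : List String), Dom_sentence_is_supported_py sentence citation_snippets cited_sources → Spec_sentence_is_supported_py sentence citation_snippets cited_sources (sentence_is_supported_py sentence citation_snippets cited_sources)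

-- ===== LEMMAS AND PROOFS =====

-- the long-word predicate shared by both proofs (the ports inline it)
def pvLong (w : String) : Bool := decide (3 < PySem.Str.len w)

-- snippets a word supports: indices of snippets whose word set contains w (for long w)
def pvHits (snips : List String) (w : String) : List Int :=
  if pvLong w then
    ((PySem.List.enumerate snips).filter (fun p => decide (w ∈ PySem.Str.split₀ p.2))).map (·.1)
  else []

-- the per-snippet score both programs compare with 2
def pvScore (sw : List String) (s : String) : Nat :=
  sw.countP (fun w => pvLong w && decide (w ∈ PySem.Str.split₀ s))

-- A's loop computes `any snippet has score ≥ 2`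
theorem pvGoA_eq_any (sw : List String) (hnd : sw.Nodup) (snips : List String) :
    pvGoA sw snips = snips.any (fun s => decide (2 ≤ pvScore sw s)) := by
  induction snips with
  | nil => rfl
  | cons s rest ih =>
    rw [List.any_cons, ← ih]
    simp only [pvGoA]
    by_cases hempty : PySem.Set.ofList (PySem.Str.split₀ s) = []
    · -- empty snippet word set: A continues, and the score is 0
      have hsplit : PySem.Str.split₀ s = [] := by
        cases hs : PySem.Str.split₀ s with
        | nil => rfl
        | cons a t =>
          exact absurd ((PySem.Set.mem_ofList _ _).mpr (hs ▸ List.mem_cons_self))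
            (by rw [hempty]; simp)
      have hscore : pvScore sw s = 0 := by
        unfold pvScore
        rw [List.countP_eq_zero]
        intro w _
        simp [hsplit]
      rw [if_pos hempty, hscore]
      simp
    · rw [if_neg hempty]
      have hkey : PySem.Set.len (PySem.Set.ofList
          ((PySem.Set.inter sw (PySem.Set.ofList (PySem.Str.split₀ s))).filter
            (fun w => decide (3 < PySem.Str.len w)))) = (pvScore sw s : Int) := by
        have hinter : PySem.Set.inter sw (PySem.Set.ofList (PySem.Str.split₀ s)) =
            sw.filter (fun w => (PySem.Set.ofList (PySem.Str.split₀ s)).contains w) := rfl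
        have hnd2 : ((sw.filter (fun w => (PySem.Set.ofList (PySem.Str.split₀ s)).contains w)).filter
            (fun w => decide (3 < PySem.Str.len w))).Nodup := (hnd.filter _).filter _
        rw [hinter, PySem.Set.ofList_eq_self_of_nodup _ hnd2]
        show (((sw.filter _).filter _).length : Int) = _
        rw [List.filter_filter, ← List.countP_eq_length_filter]
        unfold pvScore
        congr 1
        apply List.countP_congr
        intro w _
        constructor
        · intro h
          simp only [Bool.and_eq_true, decide_eq_true_eq, pvLong, PySem.Set.contains_iff,
            PySem.Set.mem_ofList] at *
          tauto
        · intro h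
          simp only [Bool.and_eq_true, decide_eq_true_eq, pvLong, PySem.Set.contains_iff,
            PySem.Set.mem_ofList] at *
          tauto
      rw [hkey]
      by_cases h2 : 2 ≤ pvScore sw s
      · rw [if_pos (by exact_mod_cast h2)]
        simp [h2]
      · rw [if_neg (by exact_mod_cast h2)]
        simp [h2]

-- one snippet's contribution to the index, entry by entry
theorem pvSetFold_getD (ws : List String) (hnd : ws.Nodup) (d : PySem.Dict String (List Int))
    (i : Int) (w : String) :
    (ws.foldl (fun d w' => if 3 < PySem.Str.len w' then d.modify w' [] (fun l => l ++ [i]) else d) d).getD w []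
      = d.getD w [] ++ (if pvLong w && decide (w ∈ ws) then [i] else []) := by
  induction ws generalizing d with
  | nil => simp
  | cons a ws ih =>
    have hna : a ∉ ws := (List.nodup_cons.mp hnd).1
    rw [List.foldl_cons, ih (List.nodup_cons.mp hnd).2]
    by_cases hw : w = a
    · subst hw
      by_cases hl : 3 < PySem.Str.len w
      · rw [if_pos hl, PySem.Dict.getD_modify_self]
        have h1 : pvLong w = true := by unfold pvLong; exact decide_eq_true hl
        simp [h1, hna]
      · rw [if_neg hl]
        have h1 : pvLong w = false := by unfold pvLong; exact decide_eq_false hl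
        simp [h1]
    · have hd' : (if 3 < PySem.Str.len a then d.modify a [] (fun l => l ++ [i]) else d).getD w []
          = d.getD w [] := by
        by_cases hl : 3 < PySem.Str.len a
        · rw [if_pos hl, PySem.Dict.getD_modify_of_ne _ _ _ hw]
        · rw [if_neg hl]
      rw [hd']
      simp [List.mem_cons, hw]

theorem pvIndexStep_getD (d : PySem.Dict String (List Int)) (p : Int × String) (w : String) :
    (pvIndexStep d p).getD w []
      = d.getD w [] ++ (if pvLong w && decide (w ∈ PySem.Str.split₀ p.2) then [p.1] else []) := by
  unfold pvIndexStep
  rw [pvSetFold_getD _ (PySem.Set.nodup_ofList _)]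
  simp [PySem.Set.mem_ofList]

-- the whole index fold, over any pair list, entry by entry
theorem pvIndexFold_getD (ps : List (Int × String)) (d : PySem.Dict String (List Int)) (w : String) :
    (ps.foldl pvIndexStep d).getD w []
      = d.getD w [] ++ (if pvLong w then
          ((ps.filter (fun p => decide (w ∈ PySem.Str.split₀ p.2))).map (·.1)) else []) := by
  induction ps generalizing d with
  | nil => simp
  | cons p ps ih =>
    rw [List.foldl_cons, ih, pvIndexStep_getD]
    by_cases hl : pvLong w
    · by_cases hm : w ∈ PySem.Str.split₀ p.2 <;> simp [hl, hm]
    · simp [hl]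

-- the inverted index is pvHits
theorem pvIndex_getD (snips : List String) (w : String) :
    ((PySem.List.enumerate snips).foldl pvIndexStep PySem.Dict.empty).getD w [] = pvHits snips w := by
  rw [pvIndexFold_getD]
  unfold pvHits
  by_cases hl : pvLong w <;> simp [hl]

-- pvHits lists are duplicate-free
theorem pvHits_nodup (snips : List String) (w : String) : (pvHits snips w).Nodup := by
  unfold pvHits
  by_cases hl : pvLong w
  · rw [if_pos hl]
    have hp := (PySem.List.pairwise_lt_enumerate snips 0).filter
      (fun p => decide (w ∈ PySem.Str.split₀ p.2))
    have hm := List.Pairwise.map (S := fun (a b : Int) => a < b)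
      (fun p : Int × String => p.1) (fun _ _ h => h) hp
    exact hm.imp ne_of_lt
  · rw [if_neg hl]; exact List.nodup_nil

-- counts over the flattened hit lists count distinct supporting sentence words
theorem pvCount_flat (content snips : List String) (i : Int) :
    List.count i (content.flatMap (pvHits snips))
      = content.countP (fun w => decide (i ∈ pvHits snips w)) := by
  induction content with
  | nil => rfl
  | cons w ws ih =>
    rw [List.flatMap_cons, List.count_append, ih, List.countP_cons]
    by_cases hm : i ∈ pvHits snips w
    · rw [List.count_eq_one_of_mem (pvHits_nodup _ _) hm]
      simp [hm, Nat.add_comm]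
    · rw [List.count_eq_zero.mpr hm]
      simp [hm]

-- membership in a hit list, spelled out
theorem pvMem_hits (snips : List String) (w : String) (i : Int) :
    i ∈ pvHits snips w ↔ pvLong w = true ∧
      ∃ (k : Nat) (h : k < snips.length), i = (k : Int) ∧ w ∈ PySem.Str.split₀ snips[k] := by
  unfold pvHits
  by_cases hl : pvLong w
  · rw [if_pos hl]
    simp only [List.mem_map, List.mem_filter, PySem.List.mem_enumerate_iff, hl, true_and]
    constructor
    · rintro ⟨p, ⟨⟨k, hk, rfl⟩, hmem⟩, rfl⟩
      exact ⟨k, hk, by simp, by simpa using hmem⟩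
    · rintro ⟨k, hk, rfl, hmem⟩
      exact ⟨((k : Int), snips[k]), ⟨⟨k, hk, by simp⟩, by simpa using hmem⟩, rfl⟩
  · rw [if_neg hl]
    simp [hl]

-- per-snippet: counting hits of snippet k over the distinct long sentence words is its score
theorem pvCountP_eq_score (L snips : List String) (k : Nat) (hk : k < snips.length) :
    (PySem.Set.ofList (L.filter (fun w => decide (3 < PySem.Str.len w)))).countP
        (fun w => decide ((k : Int) ∈ pvHits snips w))
      = pvScore (PySem.Set.ofList L) snips[k] := by
  have hperm : (PySem.Set.ofList (L.filter (fun w => decide (3 < PySem.Str.len w)))).Perm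
      ((PySem.Set.ofList L).filter (fun w => decide (3 < PySem.Str.len w))) := by
    rw [List.perm_ext_iff_of_nodup (PySem.Set.nodup_ofList _) ((PySem.Set.nodup_ofList _).filter _)]
    intro w
    simp [PySem.Set.mem_ofList, List.mem_filter]
  rw [hperm.countP_eq, List.countP_filter]
  unfold pvScore
  apply List.countP_congr
  intro w _
  simp only [Bool.and_eq_true, decide_eq_true_eq, pvMem_hits]
  constructor
  · rintro ⟨⟨hl, k', hk', hkk, hmem⟩, _⟩
    have : k' = k := by exact_mod_cast hkk.symm
    subst this
    exact ⟨hl, hmem⟩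
  · rintro ⟨hl, hmem⟩
    exact ⟨⟨hl, k, hk, rfl, hmem⟩, by simpa [pvLong] using hl⟩

-- B returns `any snippet has score ≥ 2` too
theorem pvAlt_eq_any (sentence : String) (snips : List String) (srcs : List String) :
    sentence_is_supported_py_alt sentence snips srcs =
      snips.any (fun s => decide (2 ≤ pvScore (PySem.Set.ofList (PySem.Str.split₀ (PySem.Str.lower sentence))) s)) := by
  unfold sentence_is_supported_py_alt
  show (List.foldl (fun (c : PySem.Dict Int Int) w =>
      List.foldl (fun c i => c.modify i 0 fun x => x + 1) c
        ((List.foldl pvIndexStep PySem.Dict.empty (PySem.List.enumerate snips)).getD w []))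
      PySem.Dict.empty
      (PySem.Set.ofList ((PySem.Str.split₀ (PySem.Str.lower sentence)).filter
        (fun w => decide (3 < PySem.Str.len w))))).values.any (fun c => decide (2 ≤ c)) = _
  set L := PySem.Str.split₀ (PySem.Str.lower sentence) with hL
  set content := PySem.Set.ofList (L.filter (fun w => decide (3 < PySem.Str.len w))) with hcontent
  set flat := content.flatMap (pvHits snips) with hflat
  have hfun : (fun (c : PySem.Dict Int Int) w =>
        ((((PySem.List.enumerate snips).foldl pvIndexStep PySem.Dict.empty).getD w []).foldl
          (fun c i => c.modify i 0 (· + 1)) c))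
      = (fun (c : PySem.Dict Int Int) w => ((pvHits snips w).foldl (fun c i => c.modify i 0 (· + 1)) c)) := by
    funext c w
    rw [pvIndex_getD]
  rw [hfun]
  have hcounter : content.foldl
      (fun (c : PySem.Dict Int Int) w => ((pvHits snips w).foldl (fun c i => c.modify i 0 (· + 1)) c))
      PySem.Dict.empty = PySem.Dict.counter flat := by
    rw [PySem.Dict.counter_eq_foldl, hflat, List.foldl_flatMap]
  rw [hcounter]
  have hvals : (PySem.Dict.counter flat).values
      = (PySem.Set.ofList flat).map (fun k => ((flat.count k : Nat) : Int)) := by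
    show (PySem.Dict.counter flat).items.map Prod.snd = _
    rw [PySem.Dict.items_counter, List.map_map]
    rfl
  rw [hvals, List.any_map, Bool.eq_iff_iff]
  simp only [List.any_eq_true, Function.comp_apply, decide_eq_true_eq]
  constructor
  · rintro ⟨i, hi, hcnt⟩
    have h2 : 2 ≤ flat.count i := by exact_mod_cast hcnt
    rw [hflat, pvCount_flat] at h2
    obtain ⟨w, hw, hhit⟩ := List.countP_pos_iff.mp
      (show 0 < List.countP (fun w => decide (i ∈ pvHits snips w)) content by omega)
    simp only [decide_eq_true_eq] at hhit
    obtain ⟨_, k, hk, rfl, _⟩ := (pvMem_hits snips w _).mp hhit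
    refine ⟨snips[k], List.getElem_mem hk, ?_⟩
    rw [← pvCountP_eq_score L snips k hk]
    exact h2
  · rintro ⟨s, hs, h2⟩
    obtain ⟨k, hk, rfl⟩ := List.mem_iff_getElem.mp hs
    have hcnt : 2 ≤ flat.count ((k : Nat) : Int) := by
      rw [hflat, pvCount_flat, pvCountP_eq_score L snips k hk]
      exact h2
    refine ⟨((k : Nat) : Int), ?_, by exact_mod_cast hcnt⟩
    rw [PySem.Set.mem_ofList]
    exact List.count_pos_iff.mp (by omega)

-- ===== VERDICT (by name: the statement is the Claim_ definition above) =====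
theorem sentence_is_supported_py_spec : Claim_equal_sentence_is_supported_py := by
  intro sentence snips srcs _
  unfold Spec_sentence_is_supported_py
  rw [pvAlt_eq_any, sentence_is_supported_py,
    pvGoA_eq_any _ (PySem.Set.nodup_ofList _)]
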